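-- pv_equiv track=rewrite | github.com/ToughmanL/VGAN | steps/dual-mode_feat/acoustic_feat/local/data_ckeck.py | _get_vowel
-- ===== SOURCE A (Python) =====
-- def _get_vowel(text):
--   vowels = ['a', 'o', 'e', 'i', 'u', 'v']
--   vowel, consonant, syllable = '', '', ''
--   for i in range(len(text)):
--     ch = text[i]
--     if '0' < ch < '9':
--       continue
--     else:
--       if ch in vowels:
--         vowel += ch
--       else:
--         if len(vowel)==0 and i < 2:
--           consonant+=ch
--       syllable += ch
--   return vowel, consonant, syllable
-- ===== SOURCE B (Python) =====
-- def _get_vowel(text):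
--   vowels = 'aoeiuv'
--   vowel = ''.join(ch for ch in text if ch in vowels)
--   syllable = ''.join(ch for ch in text if not ('1' <= ch <= '8'))
--   consonant = ''
--   for ch in text[:2]:
--     if '1' <= ch <= '8':
--       continue
--     if ch in vowels:
--       break
--     consonant += ch
--   return vowel, consonant, syllable
-- ===== Notes on version B (the rewrite author's own statement) =====
-- stated objective: simpler
-- what changed: Replaces A's single interleaved indexed loop maintaining three accumulators with three independent passes: two str.join-over-filter passes producing vowel and syllable, and a tiny continue/break loop over the first two characters producing consonant.
import Mathlib
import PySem

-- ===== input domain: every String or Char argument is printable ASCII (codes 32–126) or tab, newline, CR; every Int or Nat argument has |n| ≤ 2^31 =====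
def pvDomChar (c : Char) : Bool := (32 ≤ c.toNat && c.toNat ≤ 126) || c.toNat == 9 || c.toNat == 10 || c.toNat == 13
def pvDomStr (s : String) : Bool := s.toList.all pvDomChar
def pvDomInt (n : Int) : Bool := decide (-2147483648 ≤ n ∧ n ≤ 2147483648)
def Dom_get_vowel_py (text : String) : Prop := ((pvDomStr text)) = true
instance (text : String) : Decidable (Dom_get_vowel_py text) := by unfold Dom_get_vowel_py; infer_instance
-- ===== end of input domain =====

-- B computes the three outputs in separate passes (two filters + a two-char loop) instead of A's
-- single interleaved indexed loop; objective: simpler. Equivalence proved on all inputs (total).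

-- ===== PORT A =====
def pvVowels : List Char := ['a', 'o', 'e', 'i', 'u', 'v']

-- A's loop: index i over the chars, state (vowel, consonant, syllable) as char lists
def aLoop (i : Nat) (cs : List Char) (vowel consonant syllable : List Char) :
    List Char × List Char × List Char :=
  match cs with
  | [] => (vowel, consonant, syllable)
  | ch :: rest =>
    if '0' < ch ∧ ch < '9' then
      aLoop (i + 1) rest vowel consonant syllable
    else
      if ch ∈ pvVowels then
        aLoop (i + 1) rest (vowel ++ [ch]) consonant (syllable ++ [ch])
      else
        if vowel.length = 0 ∧ i < 2 then
          aLoop (i + 1) rest vowel (consonant ++ [ch]) (syllable ++ [ch])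
        else
          aLoop (i + 1) rest vowel consonant (syllable ++ [ch])

def get_vowel_py (text : String) : String × String × String :=
  let r := aLoop 0 text.toList [] [] []
  (String.ofList r.1, String.ofList r.2.1, String.ofList r.2.2)

-- ===== PORT B =====
-- consonant loop over text[:2]: skip digits '1'..'8', break on a vowel, else append
def bLoop (cs : List Char) (acc : List Char) : List Char :=
  match cs with
  | [] => acc
  | ch :: rest =>
    if '1' ≤ ch ∧ ch ≤ '8' then bLoop rest acc
    else if ch ∈ pvVowels then acc
    else bLoop rest (acc ++ [ch])

def get_vowel_py_alt (text : String) : String × String × String :=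
  let vowel := String.ofList (text.toList.filter (fun ch => ch ∈ pvVowels))
  let syllable := String.ofList (text.toList.filter (fun ch => ¬ ('1' ≤ ch ∧ ch ≤ '8')))
  let consonant := String.ofList (bLoop (text.toList.take 2) [])
  (vowel, consonant, syllable)

-- ===== PRECONDITION & SPEC =====
def Spec_get_vowel_py (text : String) (out : String × String × String) : Prop := out = get_vowel_py_alt text
instance (text : String) (out : String × String × String) : Decidable (Spec_get_vowel_py text out) := by unfold Spec_get_vowel_py; infer_instance

-- ===== CLAIM (what is proved, stated in full; the proofs are below) =====
def Claim_equal_get_vowel_py : Prop := ∀ (text : String), Dom_get_vowel_py text → Spec_get_vowel_py text (get_vowel_py text)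

-- ===== LEMMAS AND PROOFS =====

-- pure version of B's consonant loop (no accumulator)
def cPure (cs : List Char) : List Char :=
  match cs with
  | [] => []
  | ch :: rest =>
    if '1' ≤ ch ∧ ch ≤ '8' then cPure rest
    else if ch ∈ pvVowels then []
    else ch :: cPure rest

theorem bLoop_eq_cPure (cs acc : List Char) : bLoop cs acc = acc ++ cPure cs := by
  induction cs generalizing acc with
  | nil => simp [bLoop, cPure]
  | cons ch rest ih =>
    simp only [bLoop, cPure]
    split_ifs <;> simp [ih]

theorem digit_cond (ch : Char) : ('0' < ch ∧ ch < '9') ↔ ('1' ≤ ch ∧ ch ≤ '8') := by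
  have h0 : ('0' : Char).val.toNat = 48 := by decide
  have h1 : ('1' : Char).val.toNat = 49 := by decide
  have h8 : ('8' : Char).val.toNat = 56 := by decide
  have h9 : ('9' : Char).val.toNat = 57 := by decide
  simp only [Char.lt_def, Char.le_def, UInt32.lt_iff_toNat_lt, UInt32.le_iff_toNat_le, h0, h1, h8, h9]
  omega

theorem digit_not_vowel (ch : Char) (h : '1' ≤ ch ∧ ch ≤ '8') : ch ∉ pvVowels := by
  intro hm
  simp only [pvVowels, List.mem_cons, List.not_mem_nil, or_false] at hm
  rcases hm with h' | h' | h' | h' | h' | h' <;> subst h' <;> revert h <;> decide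

theorem aLoop_eq (cs : List Char) (i : Nat) (vowel consonant syllable : List Char) :
    aLoop i cs vowel consonant syllable =
      (vowel ++ cs.filter (fun ch => ch ∈ pvVowels),
       consonant ++ (if vowel = [] then cPure (cs.take (2 - i)) else []),
       syllable ++ cs.filter (fun ch => ¬ ('1' ≤ ch ∧ ch ≤ '8'))) := by
  induction cs generalizing i vowel consonant syllable with
  | nil => simp [aLoop, cPure]
  | cons ch rest ih =>
    simp only [aLoop]
    by_cases hd : '0' < ch ∧ ch < '9'
    · have hd' : ('1' ≤ ch ∧ ch ≤ '8') := (digit_cond ch).mp hd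
      rw [if_pos hd, ih]
      have hnv : ch ∉ pvVowels := digit_not_vowel ch hd'
      by_cases hv : vowel = ([] : List Char)
      · rcases Nat.lt_or_ge i 2 with hi | hi
        · have h2 : (2 - i) = (2 - (i + 1)) + 1 := by omega
          simp [hv, h2, List.take_succ_cons, cPure, hd', hnv, List.filter_cons]
        · have h1 : (2 - i) = 0 := by omega
          have h2 : (2 - (i + 1)) = 0 := by omega
          simp [hv, h1, h2, hd', hnv, List.filter_cons]
      · simp [hv, hd', hnv, List.filter_cons]
    · have hd' : ¬ ('1' ≤ ch ∧ ch ≤ '8') := fun h => hd ((digit_cond ch).mpr h)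
      rw [if_neg hd]
      by_cases hm : ch ∈ pvVowels
      · rw [if_pos hm, ih]
        by_cases hv : vowel = ([] : List Char)
        · rcases Nat.lt_or_ge i 2 with hi | hi
          · have h2 : (2 - i) = (2 - (i + 1)) + 1 := by omega
            simp [hv, h2, List.take_succ_cons, cPure, hd', hm, List.filter_cons]
          · have h1 : (2 - i) = 0 := by omega
            simp [hv, h1, cPure, List.filter_cons, hd', hm]
        · simp [hv, List.filter_cons, hd', hm]
      · rw [if_neg hm]
        by_cases hc : vowel.length = 0 ∧ i < 2
        · rw [if_pos hc, ih]
          have hv : vowel = ([] : List Char) := List.eq_nil_of_length_eq_zero hc.1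
          have h2 : (2 - i) = (2 - (i + 1)) + 1 := by omega
          simp [hv, h2, List.take_succ_cons, cPure, hd', hm, List.filter_cons]
        · rw [if_neg hc, ih]
          by_cases hv : vowel = ([] : List Char)
          · have hi : ¬ i < 2 := by
              intro hlt; exact hc ⟨by simp [hv], hlt⟩
            have h1 : (2 - i) = 0 := by omega
            have h2 : (2 - (i + 1)) = 0 := by omega
            simp [hv, h1, h2, List.filter_cons, hd', hm]
          · simp [hv, List.filter_cons, hd', hm]

-- ===== VERDICT (by name: the statement is the Claim_ definition above) =====
theorem get_vowel_py_spec : Claim_equal_get_vowel_py := by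
  intro text _
  unfold Spec_get_vowel_py get_vowel_py get_vowel_py_alt
  simp [aLoop_eq, bLoop_eq_cPure]
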